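-- pv_equiv track=rewrite | github.com/royalchan2436/Python-puzzler | puzzler_functions.py | get_view
-- ===== SOURCE A (Python) =====
-- HIDDEN = '^'
--
-- CONSONANTS = 'bcdfghjklmnpqrstvwxyz'
--
-- VOWELS = 'aeiou'
--
-- def get_view(puzzle):
--     '''(str) -> str
--
--     Return the hidden replace the puzzle
--
--     >>>get_view('banana')
--     ^^^^^^
--     >>>get_view('let's go')
--     ^^^'^ ^^
--
--     '''
--     display = ''
--     for ch in puzzle :
--         if ch in CONSONANTS or ch in VOWELS :
--             display =  display + HIDDEN
--         else :
--             display = display + ch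
--     return display
-- ===== SOURCE B (Python) =====
-- HIDDEN = '^'
--
-- CONSONANTS = 'bcdfghjklmnpqrstvwxyz'
--
-- VOWELS = 'aeiou'
--
--
-- def _is_hidden(ch):
--     return ch in CONSONANTS or ch in VOWELS
--
--
-- def get_view(puzzle):
--     # Run-length chunking: walk maximal runs of hidden/visible characters,
--     # emitting HIDDEN * runlength for hidden runs and the slice itself otherwise.
--     chunks = []
--     i, n = 0, len(puzzle)
--     while i < n:
--         j = i
--         if _is_hidden(puzzle[i]):
--             while j < n and _is_hidden(puzzle[j]):
--                 j += 1
--             chunks.append(HIDDEN * (j - i))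
--         else:
--             while j < n and not _is_hidden(puzzle[j]):
--                 j += 1
--             chunks.append(puzzle[i:j])
--         i = j
--     return ''.join(chunks)
-- ===== Notes on version B (the rewrite author's own statement) =====
-- stated objective: alternative
-- what changed: Replaces the per-character if/else loop with repeated string concatenation by run-length chunking: scan maximal runs of hidden/visible characters, emit one marker-repetition chunk or the verbatim slice per run, and join the chunks once.
import Mathlib
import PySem

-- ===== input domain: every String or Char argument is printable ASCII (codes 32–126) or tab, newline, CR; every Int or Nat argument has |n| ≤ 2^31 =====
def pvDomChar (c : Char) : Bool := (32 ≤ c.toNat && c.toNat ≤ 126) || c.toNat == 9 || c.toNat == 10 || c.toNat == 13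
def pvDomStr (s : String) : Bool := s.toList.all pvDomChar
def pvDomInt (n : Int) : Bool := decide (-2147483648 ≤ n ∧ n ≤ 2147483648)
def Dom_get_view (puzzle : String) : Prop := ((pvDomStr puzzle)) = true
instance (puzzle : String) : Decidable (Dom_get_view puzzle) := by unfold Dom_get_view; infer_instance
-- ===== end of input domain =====

-- B replaces A's per-character append loop by run-length chunking: emit '^'*runlength for each
-- maximal hidden run and the verbatim slice for each visible run, joined once (alternative decomposition).

-- ===== PORT A =====
-- A loops over the characters, appending HIDDEN for a hidden letter and the character itself otherwise.
def get_view (puzzle : String) : String :=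
  puzzle.toList.foldl
    (fun display ch =>
      if "bcdfghjklmnpqrstvwxyz".toList.contains ch || "aeiou".toList.contains ch
      then display ++ "^"
      else display ++ ch.toString) ""

-- ===== PORT B =====
-- _is_hidden(ch): ch in CONSONANTS or ch in VOWELS
def pvHid (ch : Char) : Bool :=
  "bcdfghjklmnpqrstvwxyz".toList.contains ch || "aeiou".toList.contains ch

-- the chunking while-loop of Source B: each step consumes one maximal run (takeWhile) and
-- recurses on the remainder (dropWhile); hidden runs become '^'-repetitions, visible runs stay
def get_view_chunks : List Char → List Char
  | [] => []
  | c :: rest =>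
    if pvHid c then
      '^' :: ((rest.takeWhile pvHid).map (fun _ => '^')
        ++ get_view_chunks (rest.dropWhile pvHid))
    else
      c :: (rest.takeWhile (fun d => !pvHid d)
        ++ get_view_chunks (rest.dropWhile (fun d => !pvHid d)))
  termination_by l => l.length
  decreasing_by
  · exact Nat.lt_succ_of_le (rest.length_dropWhile_le pvHid)
  · exact Nat.lt_succ_of_le (rest.length_dropWhile_le (fun d => !pvHid d))

def get_view_alt (puzzle : String) : String :=
  String.ofList (get_view_chunks puzzle.toList)

-- ===== PRECONDITION & SPEC =====
def Spec_get_view (puzzle : String) (out : String) : Prop := out = get_view_alt puzzle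
instance (puzzle : String) (out : String) : Decidable (Spec_get_view puzzle out) := by unfold Spec_get_view; infer_instance

-- ===== CLAIM (what is proved, stated in full; the proofs are below) =====
def Claim_equal_get_view : Prop := ∀ (puzzle : String), Dom_get_view puzzle → Spec_get_view puzzle (get_view puzzle)

-- ===== LEMMAS AND PROOFS =====
-- the common per-character semantics both programs realise
def pvSub (ch : Char) : Char := if pvHid ch then '^' else ch

theorem chunks_eq_map (l : List Char) : get_view_chunks l = l.map pvSub := by
  induction l using get_view_chunks.induct with
  | case1 => simp [get_view_chunks]
  | case2 c rest h ih =>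
      rw [get_view_chunks, if_pos h, ih]
      have hmap : (rest.takeWhile pvHid).map pvSub = (rest.takeWhile pvHid).map (fun _ => '^') := by
        apply List.map_congr_left
        intro a ha
        simp [pvSub, List.mem_takeWhile_imp ha]
      conv_rhs => rw [← rest.takeWhile_append_dropWhile (p := pvHid)]
      simp only [List.map_cons, List.map_append]
      rw [hmap]
      rw [show pvSub c = '^' from by simp [pvSub, h]]
  | case3 c rest h ih =>
      rw [get_view_chunks, if_neg h, List.map_cons]
      have hmap : (rest.takeWhile (fun d => !pvHid d)).map pvSub
          = rest.takeWhile (fun d => !pvHid d) := by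
        conv_rhs => rw [← List.map_id (rest.takeWhile (fun d => !pvHid d))]
        apply List.map_congr_left
        intro a ha
        have := List.mem_takeWhile_imp ha
        simp at this
        simp [pvSub, this]
      conv_rhs => rw [← rest.takeWhile_append_dropWhile (p := fun d => !pvHid d)]
      simp only [List.map_append, hmap, ih]
      simp [pvSub, h]

theorem foldl_eq_map (l : List Char) (s : String) :
    (l.foldl
      (fun display ch =>
        if "bcdfghjklmnpqrstvwxyz".toList.contains ch || "aeiou".toList.contains ch
        then display ++ "^"
        else display ++ ch.toString) s).toList
      = s.toList ++ l.map pvSub := by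
  induction l generalizing s with
  | nil => simp
  | cons a t ih =>
      simp only [List.foldl_cons, List.map_cons, ih]
      by_cases h : pvHid a = true
      · rw [if_pos (by simpa [pvHid] using h)]
        simp [pvSub, h, String.toList_append]
      · rw [if_neg (by simpa [pvHid] using h)]
        simp [pvSub, h]

-- ===== VERDICT (by name: the statement is the Claim_ definition above) =====
theorem get_view_spec : Claim_equal_get_view := by
  intro puzzle _
  show get_view puzzle = get_view_alt puzzle
  apply String.toList_inj.mp
  unfold get_view get_view_alt
  rw [foldl_eq_map, chunks_eq_map]
  simp
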